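-- pv_equiv track=rewrite | github.com/DrGregDoyle/BitClone | src/parse.py | target_to_bits
-- ===== SOURCE A (Python) =====
-- def target_to_bits(data: str | bytes) -> str:
--     # Get data as hex string
--     data = data.hex() if isinstance(data, bytes) else data
--
--     # Get first significant byte
--     sig_byte = 0
--     while True:
--         temp_data = data[2 * sig_byte: 2 * (sig_byte + 1)]
--         if temp_data != "00":
--             break
--         sig_byte += 1
--
--     # Get exp and coefficient
--     _exp = format(32 - sig_byte, "02x")
--     _coeff = data[2 * sig_byte:2 * (sig_byte + 3)]
--
--     # Return hex string
--     return _exp + _coeff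
-- ===== SOURCE B (Python) =====
-- def target_to_bits(data: str | bytes) -> str:
--     # Get data as hex string
--     data = data.hex() if isinstance(data, bytes) else data
--
--     # Recursively consume leading "00" byte pairs, carrying the exponent down;
--     # no index arithmetic: the coefficient is the first 6 chars of what remains.
--     def go(rest: str, exp: int) -> str:
--         if rest[:2] == "00":
--             return go(rest[2:], exp - 1)
--         return format(exp, "02x") + rest[:6]
--
--     return go(data, 32)
-- ===== Notes on version B (the rewrite author's own statement) =====
-- stated objective: alternative
-- what changed: Replaces A's indexed while-loop (sig_byte counter with re-slicing of the original string at 2*sig_byte offsets) by a recursion that consumes the string two characters at a time while decrementing the exponent accumulator, so no index or counter exists and the coefficient is just the first six characters of the remaining string.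
import Mathlib
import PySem

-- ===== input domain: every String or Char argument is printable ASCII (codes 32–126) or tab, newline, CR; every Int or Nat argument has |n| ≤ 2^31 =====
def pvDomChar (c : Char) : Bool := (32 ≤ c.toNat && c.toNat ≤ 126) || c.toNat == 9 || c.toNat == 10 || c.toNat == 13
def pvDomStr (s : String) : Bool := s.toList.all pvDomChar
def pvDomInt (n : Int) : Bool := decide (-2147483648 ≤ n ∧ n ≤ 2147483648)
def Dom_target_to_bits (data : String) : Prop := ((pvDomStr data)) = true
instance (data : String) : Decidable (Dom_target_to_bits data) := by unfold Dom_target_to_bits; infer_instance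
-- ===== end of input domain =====

-- B replaces A's indexed while-loop by a recursion that consumes the string two
-- characters at a time while decrementing an exponent accumulator (objective: alternative).

-- format(n, "02x"): lowercase hex, zero-padded to width 2, sign in front (shared:
-- both Pythons call the same built-in format with the same arguments)
def pvFmt02x (n : Int) : List Char :=
  PySem.Chars.zfill (if n < 0 then '-' :: Nat.toDigits 16 n.natAbs else Nat.toDigits 16 n.toNat) 2

-- ===== PORT A =====
-- the while-loop of A: advance sig_byte while data[2*sig_byte : 2*(sig_byte+1)] == "00"
def pvLoopA (l : List Char) (s : Nat) : Nat :=
  -- temp_data = data[2*s : 2*(s+1)]; if temp_data != "00": break else sig_byte += 1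
  if PySem.List.slice l (some ((2 * s : Nat) : Int)) (some ((2 * (s + 1) : Nat) : Int)) ≠ ['0', '0']
  then s else pvLoopA l (s + 1)
termination_by l.length - s
decreasing_by
  rename_i h
  have ht : PySem.List.slice l (some ((2 * s : Nat) : Int)) (some ((2 * (s + 1) : Nat) : Int))
      = ['0', '0'] := by simpa using h
  rw [PySem.List.slice_natCast] at ht
  have h2 : ((l.drop (2 * s)).take (2 * (s + 1) - 2 * s)).length = 2 := by rw [ht]; rfl
  simp [List.length_take, List.length_drop] at h2
  omega

def target_to_bits (data : String) : String :=
  let sig_byte := pvLoopA data.toList 0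
  let _exp := pvFmt02x (32 - (sig_byte : Int))
  let _coeff := PySem.List.slice data.toList (some ((2 * sig_byte : Nat) : Int))
      (some ((2 * (sig_byte + 3) : Nat) : Int))
  String.ofList (_exp ++ _coeff)

-- ===== PORT B =====
-- def go(rest, exp): if rest[:2] == "00": return go(rest[2:], exp - 1)
--                    return format(exp, "02x") + rest[:6]
def pvGoB (rest : List Char) (exp : Int) : List Char :=
  if PySem.List.slice rest none (some ((2 : Nat) : Int)) = ['0', '0']
  then pvGoB (PySem.List.slice rest (some ((2 : Nat) : Int)) none) (exp - 1)
  else pvFmt02x exp ++ PySem.List.slice rest none (some ((6 : Nat) : Int))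
termination_by rest.length
decreasing_by
  rename_i h
  rw [PySem.List.slice_to_natCast] at h
  have h2 : (rest.take 2).length = 2 := by rw [h]; rfl
  rw [PySem.List.slice_from_natCast]
  simp [List.length_take] at h2 ⊢
  omega

def target_to_bits_alt (data : String) : String :=
  String.ofList (pvGoB data.toList 32)

-- ===== PRECONDITION & SPEC =====
def Spec_target_to_bits (data : String) (out : String) : Prop := out = target_to_bits_alt data
instance (data : String) (out : String) : Decidable (Spec_target_to_bits data out) := by unfold Spec_target_to_bits; infer_instance

-- ===== CLAIM (what is proved, stated in full; the proofs are below) =====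
def Claim_equal_target_to_bits : Prop := ∀ (data : String), Dom_target_to_bits data → Spec_target_to_bits data (target_to_bits data)

-- ===== LEMMAS AND PROOFS =====

lemma pvGoB_eq_loopA (l : List Char) (s : Nat) :
    pvGoB (l.drop (2 * s)) (32 - (s : Int)) =
      pvFmt02x (32 - (pvLoopA l s : Int)) ++
        PySem.List.slice l (some ((2 * pvLoopA l s : Nat) : Int))
          (some ((2 * (pvLoopA l s + 3) : Nat) : Int)) := by
  refine pvLoopA.induct l
    (motive := fun s => pvGoB (l.drop (2 * s)) (32 - (s : Int)) =
      pvFmt02x (32 - (pvLoopA l s : Int)) ++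
        PySem.List.slice l (some ((2 * pvLoopA l s : Nat) : Int))
          (some ((2 * (pvLoopA l s + 3) : Nat) : Int))) ?_ ?_ s
  · intro s ht
    -- break case: the byte pair at position s is not "00"
    rw [PySem.List.slice_natCast, show 2 * (s + 1) - 2 * s = 2 by omega] at ht
    rw [pvLoopA]
    rw [if_pos (by rw [PySem.List.slice_natCast, show 2 * (s + 1) - 2 * s = 2 by omega]; exact ht)]
    rw [pvGoB]
    rw [if_neg (by rw [PySem.List.slice_to_natCast]; simpa using ht)]
    rw [PySem.List.slice_to_natCast, PySem.List.slice_natCast,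
      show 2 * (s + 3) - 2 * s = 6 by omega]
  · intro s ht ih
    -- continue case: the byte pair at position s is "00"
    rw [not_not, PySem.List.slice_natCast, show 2 * (s + 1) - 2 * s = 2 by omega] at ht
    rw [pvLoopA]
    rw [if_neg (by rw [PySem.List.slice_natCast, show 2 * (s + 1) - 2 * s = 2 by omega]; simpa using ht)]
    rw [pvGoB]
    rw [if_pos (by rw [PySem.List.slice_to_natCast]; exact ht)]
    rw [PySem.List.slice_from_natCast, List.drop_drop,
      show 2 * s + 2 = 2 * (s + 1) by omega,
      show (32 : Int) - (s : Int) - 1 = 32 - ((s + 1 : Nat) : Int) by push_cast; ring]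
    exact ih

-- ===== VERDICT (by name: the statement is the Claim_ definition above) =====
theorem target_to_bits_spec : Claim_equal_target_to_bits := by
  intro data _
  unfold Spec_target_to_bits target_to_bits target_to_bits_alt
  have h := pvGoB_eq_loopA data.toList 0
  simp only [Nat.mul_zero, List.drop_zero, Nat.cast_zero, sub_zero] at h
  rw [h]
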